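-- pv_equiv track=rewrite | github.com/batsheva-kri/Mabat | logic/products.py | calculate_day_total_price
-- ===== SOURCE A (Python) =====
-- def calculate_day_total_price(amount, price, price_3, price_12):
--     total = 0
--     remaining = amount
--     for pack_size, pack_price in [(90, price_12), (30, price_3), (1, price)]:
--         if remaining >= pack_size:
--             n_packs = remaining // pack_size
--             total += n_packs * pack_price
--             remaining -= n_packs * pack_size
--     return total
-- ===== SOURCE B (Python) =====
-- def calculate_day_total_price(amount, price, price_3, price_12):
--     # Price everything at the single-day rate, then apply a discount
--     # correction for each complete block of 30 days (30 singles -> one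
--     # 30-pack) and a further correction for each complete block of 90
--     # days (three 30-packs -> one 90-pack).  No pack counts or running
--     # remainder are ever computed.
--     return (amount * price
--             + (amount // 30) * (price_3 - 30 * price)
--             + (amount // 90) * (price_12 - 3 * price_3))
-- ===== Notes on version B (the rewrite author's own statement) =====
-- stated objective: simpler
-- what changed: Instead of greedily decomposing amount into 90/30/1 packs with a running remainder, B prices all days at the single rate and adds telescoped discount corrections (price_3-30*price per full 30-day block, price_12-3*price_3 per full 90-day block) from two independent floor divisions of the original amount.
-- outside the precondition, e.g. on calculate_day_total_price(-5, 1, 2, 3): A returns 0, B returns 26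
import Mathlib
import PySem

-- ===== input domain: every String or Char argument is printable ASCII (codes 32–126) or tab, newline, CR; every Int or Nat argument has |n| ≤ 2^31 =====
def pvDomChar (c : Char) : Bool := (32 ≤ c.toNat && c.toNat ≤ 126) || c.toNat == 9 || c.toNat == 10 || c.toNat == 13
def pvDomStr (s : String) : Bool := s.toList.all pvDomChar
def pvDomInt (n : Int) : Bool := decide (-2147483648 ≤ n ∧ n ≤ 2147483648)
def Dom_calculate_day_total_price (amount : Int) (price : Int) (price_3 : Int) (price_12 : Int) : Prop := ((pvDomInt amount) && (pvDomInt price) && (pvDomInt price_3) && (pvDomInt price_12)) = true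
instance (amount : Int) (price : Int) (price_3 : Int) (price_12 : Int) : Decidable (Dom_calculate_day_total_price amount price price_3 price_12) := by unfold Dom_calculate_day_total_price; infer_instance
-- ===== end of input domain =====

-- B prices all days at the single rate and adds telescoped per-30 and per-90 discount
-- corrections from independent floor divisions, instead of A's greedy pack loop (simpler).

-- ===== PORT A =====
-- literal port of A's loop: state (total, remaining) folded over the tier list
def calculate_day_total_price (amount : Int) (price : Int) (price_3 : Int) (price_12 : Int) : Int :=
  let st := [((90 : Int), price_12), ((30 : Int), price_3), ((1 : Int), price)].foldl
    (fun (st : Int × Int) pp =>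
      if st.2 ≥ pp.1 then
        let n_packs := PySem.Int.floordiv st.2 pp.1
        (st.1 + n_packs * pp.2, st.2 - n_packs * pp.1)
      else st)
    ((0 : Int), amount)
  st.1

-- ===== PORT B =====
-- port of Source B: base cost at single rate plus per-30 and per-90 discount corrections
def calculate_day_total_price_alt (amount : Int) (price : Int) (price_3 : Int) (price_12 : Int) : Int :=
  amount * price
    + (PySem.Int.floordiv amount 30) * (price_3 - 30 * price)
    + (PySem.Int.floordiv amount 90) * (price_12 - 3 * price_3)

-- ===== PRECONDITION & SPEC =====
-- Pre_ restricts to the natural domain of a quantity of days: amount ≥ 0. On negative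
-- amounts A's guards never fire and its 0 is an accident of the loop; B's discount
-- formula returns a different (equally meaningless) value there, and neither is specified.
def Pre_calculate_day_total_price (amount : Int) (price : Int) (price_3 : Int) (price_12 : Int) : Prop := 0 ≤ amount
instance (amount : Int) (price : Int) (price_3 : Int) (price_12 : Int) : Decidable (Pre_calculate_day_total_price amount price price_3 price_12) := by unfold Pre_calculate_day_total_price; infer_instance
def pvWitness_calculate_day_total_price : Int × Int × Int × Int := (125, 2, 50, 180)
def Spec_calculate_day_total_price (amount : Int) (price : Int) (price_3 : Int) (price_12 : Int) (out : Int) : Prop := out = calculate_day_total_price_alt amount price price_3 price_12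
instance (amount : Int) (price : Int) (price_3 : Int) (price_12 : Int) (out : Int) : Decidable (Spec_calculate_day_total_price amount price price_3 price_12 out) := by unfold Spec_calculate_day_total_price; infer_instance

-- ===== CLAIM (what is proved, stated in full; the proofs are below) =====
def Claim_equal_calculate_day_total_price : Prop := ∀ (amount : Int) (price : Int) (price_3 : Int) (price_12 : Int), Dom_calculate_day_total_price amount price price_3 price_12 → Pre_calculate_day_total_price amount price price_3 price_12 → Spec_calculate_day_total_price amount price price_3 price_12 (calculate_day_total_price amount price price_3 price_12)

-- ===== LEMMAS AND PROOFS =====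

theorem A_closed (amount price price_3 price_12 : Int) (h : 0 ≤ amount) :
    calculate_day_total_price amount price price_3 price_12 =
    (amount / 90) * price_12 + ((amount % 90) / 30) * price_3 + (amount % 30) * price := by
  unfold calculate_day_total_price
  simp only [List.foldl]
  have f90 : ∀ a : Int, PySem.Int.floordiv a 90 = a / 90 := fun a =>
    PySem.Int.floordiv_eq_ediv_of_pos (by norm_num)
  have f30 : ∀ a : Int, PySem.Int.floordiv a 30 = a / 30 := fun a =>
    PySem.Int.floordiv_eq_ediv_of_pos (by norm_num)
  have f1 : ∀ a : Int, PySem.Int.floordiv a 1 = a := fun a => by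
    rw [PySem.Int.floordiv_eq_ediv_of_pos (by norm_num)]; exact Int.ediv_one a
  simp only [f90, f30, f1]
  have e1 : amount - amount / 90 * 90 = amount % 90 := by omega
  simp only [e1]
  try simp only [show (amount % 90 - amount % 90 / 30 * 30 : Int) = amount % 30 from by omega]
  split_ifs <;> (try dsimp only at *) <;>
    (try rw [show (amount % 90 : Int) = amount from by omega]) <;>
    (try rw [show (amount / 90 : Int) = 0 from by omega]) <;>
    (try rw [show (amount % 90 / 30 : Int) = 0 from by omega]) <;>
    (try rw [show (amount / 30 : Int) = 0 from by omega]) <;>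
    (try rw [show (amount - amount / 30 * 30 : Int) = amount % 30 from by omega]) <;>
    (try rw [show (amount % 90 - amount % 90 / 30 * 30 : Int) = amount % 30 from by omega]) <;>
    (try rw [show (amount % 90 : Int) = amount % 30 from by omega]) <;>
    (try rw [show (amount % 30 : Int) = amount from by omega]) <;>
    (try rw [show (amount % 30 : Int) = 0 from by omega]) <;>
    (try rw [show (amount : Int) = 0 from by omega]) <;>
    omega

theorem calc_equiv (amount price price_3 price_12 : Int) (h : 0 ≤ amount) :
    calculate_day_total_price amount price price_3 price_12 =
    calculate_day_total_price_alt amount price price_3 price_12 := by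
  rw [A_closed amount price price_3 price_12 h]
  unfold calculate_day_total_price_alt
  rw [PySem.Int.floordiv_eq_ediv_of_pos (show (0:Int) < 30 by norm_num),
      PySem.Int.floordiv_eq_ediv_of_pos (show (0:Int) < 90 by norm_num)]
  -- the per-30 count splits as three per 90-block plus the leftover 30-blocks,
  -- and the singles are the remainder mod 30
  have d30 : amount / 30 = 3 * (amount / 90) + (amount % 90) / 30 := by omega
  have dm : amount % 30 = amount - 90 * (amount / 90) - 30 * ((amount % 90) / 30) := by omega
  rw [d30, dm]; ring

-- ===== VERDICT (by name: the statement is the Claim_ definition above) =====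
theorem calculate_day_total_price_spec : Claim_equal_calculate_day_total_price := by
  intro amount price price_3 price_12 _ hpre
  unfold Spec_calculate_day_total_price
  exact calc_equiv amount price price_3 price_12 hpre
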